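-- pv_equiv track=rewrite | github.com/petyasoft/Dym-Converter | main.py | is_ens_domain
-- ===== SOURCE A (Python) =====
-- ens_tld = 'eth'
--
-- def is_ens_domain(input_str):
--     input_str = input_str.lower()
--     if not input_str.endswith(f'.{ens_tld}') or len(input_str) < 3 + 1 + len(ens_tld):
--         return False
--     spl = input_str.split('.')
--     for i, part in enumerate(spl[:-1]):
--         if i == len(spl) - 2:
--             if len(part) < 3:
--                 return False
--         else:
--             if len(part) < 1:
--                 return False
--     return True
-- ===== SOURCE B (Python) =====
-- ens_tld = 'eth'
--
-- def is_ens_domain(input_str):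
--     # single left-to-right pass: a tiny state machine over the characters,
--     # no split / no per-label list
--     ok = True        # every label closed so far was non-empty
--     lastlen = -1     # length of the most recently closed label (-1: none yet)
--     cur = ''         # the label currently being read
--     for ch in input_str.lower():
--         if ch == '.':
--             ok = ok and len(cur) > 0
--             lastlen = len(cur)
--             cur = ''
--         else:
--             cur += ch
--     return ok and lastlen >= 3 and cur == ens_tld
-- ===== Notes on version B (the rewrite author's own statement) =====
-- stated objective: alternative
-- what changed: Replaces A's endswith/length guard plus dot-splitting and an indexed loop over the labels by a single left-to-right character scan (a small state machine tracking the current label, the last closed label's length and a validity flag), with no splitting and no length guard.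
import Mathlib
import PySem

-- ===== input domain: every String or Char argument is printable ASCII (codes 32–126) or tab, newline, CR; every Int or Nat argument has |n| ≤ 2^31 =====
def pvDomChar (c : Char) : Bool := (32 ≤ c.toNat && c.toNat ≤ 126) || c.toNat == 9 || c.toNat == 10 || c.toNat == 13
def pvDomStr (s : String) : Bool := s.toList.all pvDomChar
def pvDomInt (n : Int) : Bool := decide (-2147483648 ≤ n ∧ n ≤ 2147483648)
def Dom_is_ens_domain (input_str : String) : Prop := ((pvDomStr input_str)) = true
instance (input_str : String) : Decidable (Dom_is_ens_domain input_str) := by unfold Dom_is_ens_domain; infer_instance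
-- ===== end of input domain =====

-- B replaces A's endswith/length guard + split('.') + indexed label loop by one
-- left-to-right character scan (a small state machine); alternative, not claimed faster.

-- ===== PORT A =====
def pvEnsTld : String := "eth"

-- the for-loop over enumerate(spl[:-1]) with its early returns
def pvALoop (n : Int) : List (Int × String) → Bool
  | [] => true
  | (i, part) :: rest =>
    if i == n - 2 then
      if PySem.Str.len part < 3 then false else pvALoop n rest
    else
      if PySem.Str.len part < 1 then false else pvALoop n rest

def is_ens_domain (input_str : String) : Bool :=
  let s := PySem.Str.lower input_str
  if !(PySem.Str.endswith s ("." ++ pvEnsTld)) || decide (PySem.Str.len s < 3 + 1 + PySem.Str.len pvEnsTld) then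
    false
  else
    match PySem.Str.split? s "." with
    | none => false   -- unreachable: the separator "." is non-empty
    | some spl => pvALoop (spl.length : Int) (PySem.List.enumerate (PySem.List.slice spl none (some (-1))))

-- ===== PORT B =====
-- one step of the scan: state = (ok, lastlen, cur)
def pvBStep (st : Bool × Int × List Char) (ch : Char) : Bool × Int × List Char :=
  if ch == '.' then (st.1 && decide (0 < st.2.2.length), (st.2.2.length : Int), [])
  else (st.1, st.2.1, st.2.2 ++ [ch])

def is_ens_domain_alt (input_str : String) : Bool :=
  let st := (PySem.Str.lower input_str).toList.foldl pvBStep (true, -1, [])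
  st.1 && decide ((3 : Int) ≤ st.2.1) && (st.2.2 == pvEnsTld.toList)

-- ===== PRECONDITION & SPEC =====
def Spec_is_ens_domain (input_str : String) (out : Bool) : Prop := out = is_ens_domain_alt input_str
instance (input_str : String) (out : Bool) : Decidable (Spec_is_ens_domain input_str out) := by unfold Spec_is_ens_domain; infer_instance

-- ===== CLAIM (what is proved, stated in full; the proofs are below) =====
def Claim_equal_is_ens_domain : Prop := ∀ (input_str : String), Dom_is_ens_domain input_str → Spec_is_ens_domain input_str (is_ens_domain input_str)

-- ===== LEMMAS AND PROOFS =====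

-- the list of '.'-separated labels, by left recursion
def pvParts : List Char → List (List Char)
  | [] => [[]]
  | c :: cs =>
    if c = '.' then [] :: pvParts cs
    else
      match pvParts cs with
      | [] => [[c]]
      | p :: ps => (c :: p) :: ps

-- prepend to the first label
def pvCH (a : List Char) : List (List Char) → List (List Char)
  | [] => [a]
  | p :: ps => (a ++ p) :: ps

-- length of the second-to-last label, or the default
def pvPen (q : List (List Char)) (ll : Int) : Int :=
  match q.dropLast.getLast? with
  | none => ll
  | some p => (p.length : Int)

theorem pvParts_ne_nil (cs : List Char) : pvParts cs ≠ [] := by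
  cases cs with
  | nil => simp [pvParts]
  | cons c cs =>
    simp only [pvParts]
    split
    · simp
    · cases h : pvParts cs <;> simp

theorem pvCH_nil (q : List (List Char)) (h : q ≠ []) : pvCH [] q = q := by
  cases q with
  | nil => exact absurd rfl h
  | cons p ps => simp [pvCH]

theorem pvCH_assoc (a b : List Char) (q : List (List Char)) :
    pvCH a (pvCH b q) = pvCH (a ++ b) q := by
  cases q <;> simp [pvCH]

theorem pvParts_cons_ne (c : Char) (cs : List Char) (h : ¬ c = '.') :
    pvParts (c :: cs) = pvCH [c] (pvParts cs) := by
  simp only [pvParts, if_neg h]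
  cases hp : pvParts cs <;> simp [pvCH]

theorem pvGo_eq (fuel : Nat) : ∀ (l cur : List Char) (acc : List (List Char)), l.length < fuel →
    PySem.Chars.splitOn.go ['.'] fuel l cur acc = acc.reverse ++ pvCH cur.reverse (pvParts l) := by
  induction fuel with
  | zero => intro l cur acc h; omega
  | succ m ih =>
    intro l cur acc h
    cases l with
    | nil => simp [PySem.Chars.splitOn.go, pvParts, pvCH]
    | cons c rest =>
      by_cases hc : c = '.'
      · subst hc
        have hpre : List.isPrefixOf ['.'] ('.' :: rest) = true := by simp [List.isPrefixOf]
        simp only [PySem.Chars.splitOn.go, hpre, if_pos]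
        rw [ih _ _ _ (by simp at h ⊢; omega)]
        have h1 : pvParts ('.' :: rest) = [] :: pvParts rest := by simp [pvParts]
        rw [h1]
        have h2 : List.drop ['.'].length ('.' :: rest) = rest := by simp
        rw [h2, show ([] : List Char).reverse = [] from rfl,
          pvCH_nil _ (pvParts_ne_nil rest)]
        cases hp : pvParts rest <;> simp [pvCH]
      · have hpre : List.isPrefixOf ['.'] (c :: rest) = false := by
          simp [List.isPrefixOf]; exact fun h' => hc h'.symm
        simp only [PySem.Chars.splitOn.go, hpre, Bool.false_eq_true, if_false]
        rw [ih _ _ _ (by simp at h ⊢; omega)]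
        rw [pvParts_cons_ne c rest hc, pvCH_assoc]
        simp

theorem pvSplitOn_eq (cs : List Char) : PySem.Chars.splitOn cs ['.'] = pvParts cs := by
  show PySem.Chars.splitOn.go ['.'] (cs.length + 1) cs [] [] = _
  rw [pvGo_eq (cs.length + 1) cs [] [] (by omega)]
  simpa using pvCH_nil _ (pvParts_ne_nil cs)

-- the A-side loop over the enumerated labels
theorem pvALoop_eq (ps : List (List Char)) : ∀ (s n : Int), s + ps.length = n - 1 →
    pvALoop n (PySem.List.enumerate (ps.map String.ofList) s) =
      (ps.dropLast.all (fun l => decide (0 < l.length)) &&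
        match ps.getLast? with
        | none => true
        | some l => decide (3 ≤ l.length)) := by
  induction ps with
  | nil => intro s n _; simp [PySem.List.enumerate, pvALoop]
  | cons x rest ih =>
    intro s n hn
    rw [List.map_cons, PySem.List.enumerate_cons]
    cases rest with
    | nil =>
      have hs : s == n - 2 := by simp at hn ⊢; omega
      simp only [pvALoop, hs, if_pos, PySem.Str.len]
      simp [pvALoop, PySem.Chars.len]
      by_cases hx : x.length < 3
      · have h2 : ¬ 3 ≤ x.length := by omega
        simp [hx, h2]
      · have h2 : 3 ≤ x.length := by omega
        simp [hx, h2]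
    | cons y t =>
      have hs : (s == n - 2) = false := by
        simp only [List.length_cons] at hn
        simp only [beq_eq_false_iff_ne, ne_eq]
        push_cast at hn
        omega
      simp only [pvALoop, hs, Bool.false_eq_true, if_false]
      rw [ih (s + 1) n (by simp at hn ⊢; push_cast; omega)]
      simp only [PySem.Str.len, PySem.Chars.len]
      simp only [List.dropLast_cons_of_ne_nil (by simp : y :: t ≠ []),
        List.getLast?_cons_cons, List.all_cons]
      by_cases hx : ((String.ofList x).toList.length : Int) < 1
      · have hx1 : x = [] := by simpa using hx
        subst hx1
        simp only [if_pos hx]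
        simp
      · have hpos : 0 < x.length := by
          simp at hx
          exact List.length_pos_of_ne_nil hx
        simp only [if_neg hx]
        simp [hpos, Bool.and_assoc]

-- the B-side scan, explained by pvParts
theorem pvFold_eq (cs : List Char) : ∀ (ok : Bool) (ll : Int) (cur : List Char),
    cs.foldl pvBStep (ok, ll, cur) =
      (ok && (pvCH cur (pvParts cs)).dropLast.all (fun l => decide (0 < l.length)),
       pvPen (pvCH cur (pvParts cs)) ll,
       (pvCH cur (pvParts cs)).getLast?.getD []) := by
  induction cs with
  | nil => intro ok ll cur; simp [pvParts, pvCH, pvPen]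
  | cons c cs ih =>
    intro ok ll cur
    rw [List.foldl_cons]
    by_cases hc : c = '.'
    · subst hc
      simp only [pvBStep, beq_self_eq_true, if_pos]
      rw [ih]
      rw [pvCH_nil _ (pvParts_ne_nil cs)]
      have h1 : pvParts ('.' :: cs) = [] :: pvParts cs := by simp [pvParts]
      rw [h1]
      obtain ⟨p, ps, hp⟩ := List.exists_cons_of_ne_nil (pvParts_ne_nil cs)
      rw [hp]
      simp only [pvCH, List.append_nil, Prod.ext_iff]
      refine ⟨?_, ?_, ?_⟩
      · simp only [List.dropLast_cons_of_ne_nil (by simp : p :: ps ≠ []), List.all_cons]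
        simp [Bool.and_assoc]
      · simp only [pvPen, List.dropLast_cons_of_ne_nil (by simp : p :: ps ≠ [])]
        cases hdl : (p :: ps).dropLast with
        | nil => simp [hdl]
        | cons q qs =>
          cases hgl : (q :: qs).getLast? with
          | none => simp at hgl
          | some r => simp [hgl]
      · simp
    · have hbeq : (c == '.') = false := by simpa using hc
      simp only [pvBStep, hbeq, Bool.false_eq_true, if_false]
      rw [ih, pvParts_cons_ne c cs hc, pvCH_assoc]

-- stitching the labels back together
def pvJoin : List (List Char) → List Char
  | [] => []
  | [x] => x
  | x :: xs => x ++ '.' :: pvJoin xs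

theorem pvJoin_cons (x : List Char) (xs : List (List Char)) (h : xs ≠ []) :
    pvJoin (x :: xs) = x ++ '.' :: pvJoin xs := by
  cases xs with
  | nil => exact absurd rfl h
  | cons y t => rfl

theorem pvJoin_pvCH (a : List Char) (q : List (List Char)) :
    pvJoin (pvCH a q) = a ++ pvJoin q := by
  cases q with
  | nil => simp [pvCH, pvJoin]
  | cons p ps =>
    cases ps with
    | nil => simp [pvCH, pvJoin]
    | cons y t =>
      simp only [pvCH]
      rw [pvJoin_cons (a ++ p) (y :: t) (by simp), pvJoin_cons p (y :: t) (by simp)]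
      simp

theorem pvJoin_pvParts (cs : List Char) : pvJoin (pvParts cs) = cs := by
  induction cs with
  | nil => rfl
  | cons c cs ih =>
    by_cases hc : c = '.'
    · subst hc
      have h1 : pvParts ('.' :: cs) = [] :: pvParts cs := by simp [pvParts]
      rw [h1, pvJoin_cons _ _ (pvParts_ne_nil cs), ih]
      simp
    · rw [pvParts_cons_ne c cs hc, pvJoin_pvCH, ih]
      simp

theorem pvJoin_concat (q : List (List Char)) (x : List Char) (h : q ≠ []) :
    pvJoin (q ++ [x]) = pvJoin q ++ '.' :: x := by
  induction q with
  | nil => exact absurd rfl h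
  | cons p ps ih =>
    cases ps with
    | nil => simp [pvJoin]
    | cons y t =>
      rw [List.cons_append, pvJoin_cons _ _ (by simp), pvJoin_cons _ _ (by simp),
        ih (by simp)]
      simp

theorem pvParts_append_dot (xs ys : List Char) :
    pvParts (xs ++ '.' :: ys) = pvParts xs ++ pvParts ys := by
  induction xs with
  | nil => simp [pvParts]
  | cons c cs ih =>
    by_cases hc : c = '.'
    · subst hc
      have h1 : ∀ zs, pvParts ('.' :: zs) = [] :: pvParts zs := fun zs => by simp [pvParts]
      rw [List.cons_append, h1, h1, ih]
      rfl
    · rw [List.cons_append, pvParts_cons_ne c _ hc, pvParts_cons_ne c cs hc, ih]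
      obtain ⟨p, ps, hp⟩ := List.exists_cons_of_ne_nil (pvParts_ne_nil cs)
      rw [hp]
      simp [pvCH]

-- endswith ".eth" ⇔ the label list ends in a separate "eth" label
theorem pvEndswith_iff (t : List Char) :
    PySem.Chars.endswith t ['.', 'e', 't', 'h'] = true ↔
      ∃ q, q ≠ [] ∧ pvParts t = q ++ [['e', 't', 'h']] := by
  rw [PySem.Chars.endswith_iff]
  constructor
  · rintro ⟨u, hu⟩
    refine ⟨pvParts u, pvParts_ne_nil u, ?_⟩
    have : t = u ++ '.' :: ['e', 't', 'h'] := by simpa using hu.symm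
    rw [this, pvParts_append_dot]
    rfl
  · rintro ⟨q, hq, hp⟩
    refine ⟨pvJoin q, ?_⟩
    have := pvJoin_pvParts t
    rw [hp, pvJoin_concat q _ hq] at this
    simpa using this

-- a valid ENS name is at least 7 characters long
theorem pvLen_ge (t : List Char) (q0 : List (List Char)) (pen : List Char)
    (hp : pvParts t = (q0 ++ [pen]) ++ [['e', 't', 'h']]) (h3 : 3 ≤ pen.length) :
    7 ≤ t.length := by
  have := pvJoin_pvParts t
  rw [hp, pvJoin_concat _ _ (by simp)] at this
  have hlen : t.length = (pvJoin (q0 ++ [pen])).length + 4 := by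
    rw [← this]; simp
  have hpen : pen.length ≤ (pvJoin (q0 ++ [pen])).length := by
    cases q0 with
    | nil => simp [pvJoin]
    | cons y t' =>
      rw [pvJoin_concat _ _ (by simp)]
      simp
      omega
  omega

-- ===== VERDICT (by name: the statement is the Claim_ definition above) =====
theorem is_ens_domain_spec : Claim_equal_is_ens_domain := by
  intro input_str _
  show is_ens_domain input_str = is_ens_domain_alt input_str
  simp only [is_ens_domain, is_ens_domain_alt]
  generalize PySem.Str.lower input_str = s
  rw [show PySem.Str.endswith s ("." ++ pvEnsTld) = PySem.Chars.endswith s.toList ['.', 'e', 't', 'h'] from by simp [pvEnsTld]]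
  rw [show PySem.Str.len s = (s.toList.length : Int) from by simp]
  rw [show PySem.Str.len pvEnsTld = (3 : Int) from by simp [pvEnsTld, PySem.Str.len]]
  rw [show PySem.Str.split? s "." = some ((pvParts s.toList).map String.ofList) from by
    simp [PySem.Str.split?, PySem.Chars.split?, pvSplitOn_eq]]
  rw [pvFold_eq s.toList true (-1) [], pvCH_nil _ (pvParts_ne_nil s.toList)]
  generalize s.toList = t
  dsimp only
  rw [PySem.List.slice_to_neg_one, ← List.map_dropLast]
  simp only [List.length_map]
  rw [pvALoop_eq (pvParts t).dropLast 0 ((pvParts t).length : Int)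
    (by
      have h0 : 0 < (pvParts t).length := List.length_pos_of_ne_nil (pvParts_ne_nil t)
      simp only [List.length_dropLast]
      push_cast
      omega)]
  simp only [Bool.true_and]
  -- case analysis on the shape of the label list
  rcases List.eq_nil_or_concat (pvParts t) with hnil | ⟨q, last, hq⟩
  · exact absurd hnil (pvParts_ne_nil t)
  rw [List.concat_eq_append] at hq
  rcases List.eq_nil_or_concat q with hq0 | ⟨q0, pen, hq'⟩
  · -- a single label: no dot in the string at all, both sides are false
    subst hq0
    have hend : PySem.Chars.endswith t ['.', 'e', 't', 'h'] = false := by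
      rw [← Bool.not_eq_true, pvEndswith_iff]
      rintro ⟨q', hq', hpp⟩
      rw [hq] at hpp
      have hl : q'.length + 1 = 1 := by
        have := congrArg List.length hpp
        simpa using this.symm
      have : q' = [] := by
        cases q' with
        | nil => rfl
        | cons a b => simp at hl
      exact hq' this
    rw [hq]
    simp [hend, pvPen]
  · rw [List.concat_eq_append] at hq'
    subst hq'
    rw [hq]
    have hdl : ((q0 ++ [pen]) ++ [last]).dropLast = q0 ++ [pen] := by simp
    have hgl : ((q0 ++ [pen]) ++ [last]).getLast? = some last := by simp
    have hdl2 : (q0 ++ [pen]).dropLast = q0 := by simp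
    have hgl2 : (q0 ++ [pen]).getLast? = some pen := by simp
    rw [hdl, hgl, hdl2, hgl2]
    simp only [pvPen, hdl, hgl2]
    by_cases hlast : last = ['e', 't', 'h']
    · subst hlast
      have hend : PySem.Chars.endswith t ['.', 'e', 't', 'h'] = true := by
        rw [pvEndswith_iff]
        exact ⟨q0 ++ [pen], by simp, hq⟩
      by_cases h3 : 3 ≤ pen.length
      · have hlen : ¬ ((t.length : Int) < 3 + 1 + 3) := by
          have := pvLen_ge t q0 pen hq h3
          push_cast
          omega
        have hp0 : 0 < pen.length := by omega
        have h3' : ((3 : Int) ≤ (pen.length : Int)) := by push_cast; omega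
        have h7 : 7 ≤ t.length := by push_cast at hlen; omega
        simp [hend, hlen, h3, h3', hp0, h7, pvEnsTld, Bool.and_comm, Bool.and_assoc,
          Bool.and_left_comm]
      · have h3' : ¬ ((3 : Int) ≤ (pen.length : Int)) := by push_cast; omega
        simp [hend, h3, h3']
    · have hend : PySem.Chars.endswith t ['.', 'e', 't', 'h'] = false := by
        rw [← Bool.not_eq_true, pvEndswith_iff]
        rintro ⟨q', hq', hpp⟩
        rw [hq] at hpp
        have : last = ['e', 't', 'h'] := by
          have h1 := congrArg (fun l => l.getLast?) hpp
          simpa using h1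
        exact hlast this
      have hb : (last == pvEnsTld.toList) = false := by simpa [pvEnsTld] using hlast
      simp [hend, hb]
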